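-- pv_equiv track=rewrite | github.com/dimtsi/AoC2021 | Day3/day3.py | count_zeros_ones
-- ===== SOURCE A (Python) =====
-- from typing import List, Tuple
--
-- def count_zeros_ones(l: List[str]) -> Tuple[List[int], List[int]]:
--     size = len(l[0])
--     ones = [0] * size
--     zeros = ones[:]
--
--     for line in l:
--         for i in range(size):
--             if int(line[i]) == 0:
--                 zeros[i] += 1
--             else:
--                 ones[i] += 1
--     return zeros, ones
-- ===== SOURCE B (Python) =====
-- from typing import List, Tuple
--
-- def count_zeros_ones(l: List[str]) -> Tuple[List[int], List[int]]:
--     size = len(l[0])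
--     n = len(l)
--     ones = [sum(1 for line in l if int(line[i]) != 0) for i in range(size)]
--     zeros = [n - o for o in ones]
--     return zeros, ones
-- ===== Notes on version B (the rewrite author's own statement) =====
-- stated objective: simpler
-- what changed: Replaces A's line-outer loop that mutates two pre-allocated arrays with a position-outer comprehension: ones[i] is a count over the lines and zeros[i] is len(l) - ones[i], so no mutable state remains.
import Mathlib
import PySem

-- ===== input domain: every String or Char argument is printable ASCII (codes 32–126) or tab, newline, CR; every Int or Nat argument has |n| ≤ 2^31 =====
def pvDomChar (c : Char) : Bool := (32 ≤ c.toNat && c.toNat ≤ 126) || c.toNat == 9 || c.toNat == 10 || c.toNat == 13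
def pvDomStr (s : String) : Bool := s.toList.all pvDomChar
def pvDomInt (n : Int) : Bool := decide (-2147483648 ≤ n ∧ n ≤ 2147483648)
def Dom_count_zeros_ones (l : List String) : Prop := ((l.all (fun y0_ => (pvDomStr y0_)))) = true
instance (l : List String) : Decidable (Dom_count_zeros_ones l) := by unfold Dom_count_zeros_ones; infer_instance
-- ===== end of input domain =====

-- B swaps the loop nest: instead of A's line-outer loop mutating two arrays, B computes,
-- position by position, ones[i] as a count over the lines and zeros[i] as len(l) - ones[i].

-- int(line[i]), the subexpression both Pythons contain; the defaults are only reached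
-- outside Pre_ (where Python raises IndexError / ValueError).
def pvIntAt (line : String) (i : Int) : Int :=
  (PySem.Int.ofChars? [((PySem.Str.pyGet? line i).getD ' ')]).getD 0

-- ===== PORT A =====
def count_zeros_ones (l : List String) : List Int × List Int :=
  let size : Int := PySem.Str.len ((PySem.List.pyGet? l 0).getD "")  -- len(l[0]); l ≠ [] by Pre_
  let ones : List Int := List.replicate size.toNat 0
  let zeros : List Int := ones
  l.foldl (fun (zo : List Int × List Int) line =>
    (PySem.List.pyRange 0 size 1).foldl (fun (zo : List Int × List Int) i =>
      if pvIntAt line i = 0 then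
        (PySem.List.pySetD zo.1 i (PySem.List.pyGetD zo.1 i 0 + 1), zo.2)
      else
        (zo.1, PySem.List.pySetD zo.2 i (PySem.List.pyGetD zo.2 i 0 + 1))) zo) (zeros, ones)

-- ===== PORT B =====
def count_zeros_ones_alt (l : List String) : List Int × List Int :=
  let size : Int := PySem.Str.len ((PySem.List.pyGet? l 0).getD "")  -- len(l[0]); l ≠ [] by Pre_
  let n : Int := l.length
  let ones : List Int := (PySem.List.pyRange 0 size 1).map (fun i =>
      (l.map (fun line => if pvIntAt line i ≠ 0 then (1 : Int) else 0)).sum)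
  let zeros : List Int := ones.map (fun o => n - o)
  (zeros, ones)

-- ===== PRECONDITION & SPEC =====
-- Pre_ excludes exactly the inputs where Python A raises: the empty list (IndexError on l[0]),
-- lines shorter than l[0] (IndexError) and non-digit characters in the first len(l[0]) columns (ValueError).
def Pre_count_zeros_ones (l : List String) : Prop :=
  l ≠ [] ∧ ∀ line ∈ l, ∀ j < (l.headD "").toList.length,
    j < line.toList.length ∧ (line.toList.getD j ' ').isDigit
instance (l : List String) : Decidable (Pre_count_zeros_ones l) := by
  unfold Pre_count_zeros_ones; infer_instance

def pvWitness_count_zeros_ones : List String := ["01", "10", "11"]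

def Spec_count_zeros_ones (l : List String) (out : List Int × List Int) : Prop := out = count_zeros_ones_alt l
instance (l : List String) (out : List Int × List Int) : Decidable (Spec_count_zeros_ones l out) := by unfold Spec_count_zeros_ones; infer_instance

-- ===== CLAIM (what is proved, stated in full; the proofs are below) =====
def Claim_equal_count_zeros_ones : Prop := ∀ (l : List String), Dom_count_zeros_ones l → Pre_count_zeros_ones l → Spec_count_zeros_ones l (count_zeros_ones l)

-- ===== LEMMAS AND PROOFS =====

-- the updated array after one more loop index m (the branch taken at m)
lemma pv_set_succ (z : List Int) (m : Nat) (P : Nat → Prop) [DecidablePred P] (hP : P m) :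
    (z.mapIdx (fun j x => if j < m ∧ P j then x + 1 else x)).set m
      ((z.mapIdx (fun j x => if j < m ∧ P j then x + 1 else x)).getD m 0 + 1)
    = z.mapIdx (fun j x => if j < m + 1 ∧ P j then x + 1 else x) := by
  apply List.ext_getElem?; intro k
  by_cases hk : m = k
  · subst hk
    rcases h : z[m]? with _ | x
    · have hlen : z.length ≤ m := List.getElem?_eq_none_iff.mp h
      simp only [List.getElem?_set, List.length_mapIdx, List.getElem?_mapIdx, h]
      simp [Nat.not_lt.mpr hlen]
    · have hm : m < z.length := by
        by_contra hc
        simp [List.getElem?_eq_none_iff.mpr (Nat.le_of_not_lt hc)] at h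
      simp only [List.getElem?_set, List.length_mapIdx, List.getElem?_mapIdx, h,
        List.getD_eq_getElem?_getD]
      simp [hm, hP]
  · rw [List.getElem?_set, if_neg hk, List.getElem?_mapIdx, List.getElem?_mapIdx]
    rcases z[k]? with _ | x
    · simp
    · simp only [Option.map_some, Option.some.injEq]
      split_ifs with h1 h2 h2
      · rfl
      · exact absurd ⟨Nat.lt_succ_of_lt h1.1, h1.2⟩ h2
      · exfalso
        by_cases hkm : k < m
        · exact h1 ⟨hkm, h2.2⟩
        · exact hk (by omega)
      · rfl

-- the untouched array after one more loop index m (the branch NOT taken at m)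
lemma pv_skip_succ (o : List Int) (m : Nat) (Q : Nat → Prop) [DecidablePred Q] (hQ : ¬ Q m) :
    o.mapIdx (fun j x => if j < m ∧ Q j then x + 1 else x)
    = o.mapIdx (fun j x => if j < m + 1 ∧ Q j then x + 1 else x) := by
  apply List.ext_getElem?; intro k
  rw [List.getElem?_mapIdx, List.getElem?_mapIdx]
  rcases o[k]? with _ | x
  · simp
  · simp only [Option.map_some, Option.some.injEq]
    split_ifs with h1 h2 h2
    · rfl
    · exact absurd ⟨Nat.lt_succ_of_lt h1.1, h1.2⟩ h2
    · exfalso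
      by_cases hkm : k < m
      · exact h1 ⟨hkm, h2.2⟩
      · have hkm' : k = m := by omega
        exact hQ (hkm' ▸ h2.2)
    · rfl

lemma pv_mapIdx_id (z : List Int) : List.mapIdx (fun _ x => x) z = z := by
  apply List.ext_getElem?; intro k; simp [List.getElem?_mapIdx]

-- A's inner loop over range(size), as a pointwise update of both arrays
lemma pv_inner_eq (line : String) (m : Nat) (z o : List Int) :
    (List.range m).foldl (fun (zo : List Int × List Int) (j : Nat) =>
        if pvIntAt line (j : Int) = 0 then
          (zo.1.set j (zo.1.getD j 0 + 1), zo.2)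
        else (zo.1, zo.2.set j (zo.2.getD j 0 + 1))) (z, o)
    = (z.mapIdx (fun j x => if j < m ∧ pvIntAt line (j : Int) = 0 then x + 1 else x),
       o.mapIdx (fun j x => if j < m ∧ ¬ pvIntAt line (j : Int) = 0 then x + 1 else x)) := by
  induction m with
  | zero => simp [pv_mapIdx_id]
  | succ m ih =>
      rw [List.range_succ, List.foldl_append, ih, List.foldl_cons, List.foldl_nil]
      by_cases h : pvIntAt line (m : Int) = 0
      · rw [if_pos h]
        exact Prod.ext (pv_set_succ z m _ h) (pv_skip_succ o m _ (by simp [h]))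
      · rw [if_neg h]
        exact Prod.ext (pv_skip_succ z m _ h) (pv_set_succ o m _ h)

-- A's outer loop over the lines, as a pointwise count
lemma pv_outer_eq (m : Nat) (L : List String) : ∀ (z o : List Int),
    L.foldl (fun (zo : List Int × List Int) line =>
      (List.range m).foldl (fun (zo : List Int × List Int) (j : Nat) =>
          if pvIntAt line (j : Int) = 0 then
            (zo.1.set j (zo.1.getD j 0 + 1), zo.2)
          else (zo.1, zo.2.set j (zo.2.getD j 0 + 1))) zo) (z, o)
    = (z.mapIdx (fun j x => if j < m then x + (L.countP (fun line => pvIntAt line (j : Int) == 0) : Int) else x),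
       o.mapIdx (fun j x => if j < m then x + (L.countP (fun line => pvIntAt line (j : Int) != 0) : Int) else x)) := by
  induction L with
  | nil => intro z o; simp [pv_mapIdx_id]
  | cons line L ihL =>
      intro z o
      rw [List.foldl_cons, pv_inner_eq, ihL, List.mapIdx_mapIdx, List.mapIdx_mapIdx]
      refine Prod.ext ?_ ?_ <;> · simp only
                                  congr 1
                                  funext j x
                                  by_cases hj : j < m <;>
                                    by_cases h : pvIntAt line (j : Int) = 0 <;>
                                      simp [hj, h] <;> ring

lemma pv_mapIdx_replicate (m : Nat) (f : Nat → Int → Int) :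
    (List.replicate m (0 : Int)).mapIdx f = (List.range m).map (fun j => f j 0) := by
  apply List.ext_getElem?; intro k
  rw [List.getElem?_mapIdx]
  by_cases hk : k < m
  · simp [hk]
  · simp [hk]

-- B's per-column generator sum is a count
lemma pv_sum_eq_cnt (l : List String) (i : Int) :
    (l.map (fun line => if pvIntAt line i ≠ 0 then (1 : Int) else 0)).sum
    = (l.countP (fun line => pvIntAt line i != 0) : Int) := by
  rw [← PySem.List.sum_map_ite_one_zero (fun line => pvIntAt line i != 0) l]
  congr 1
  apply List.map_congr_left
  intro line _
  by_cases h : pvIntAt line i = 0 <;> simp [h]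

-- counting partition: zeros = n - ones at every column
lemma pv_cnt_partition (l : List String) (i : Int) :
    (l.countP (fun line => pvIntAt line i == 0) : Int)
    = (l.length : Int) - (l.countP (fun line => pvIntAt line i != 0) : Int) := by
  have h := List.length_eq_countP_add_countP (fun line => pvIntAt line i == 0) (l := l)
  have hpred : (fun line => decide ¬ (pvIntAt line i == 0) = true)
      = (fun line => pvIntAt line i != 0) := by
    funext line; by_cases hc : pvIntAt line i = 0 <;> simp [hc]
  rw [hpred] at h
  omega

-- ===== VERDICT (by name: the statement is the Claim_ definition above) =====
theorem count_zeros_ones_spec : Claim_equal_count_zeros_ones := by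
  intro l _ _
  unfold Spec_count_zeros_ones count_zeros_ones count_zeros_ones_alt
  simp only
  simp only [PySem.List.pyRange_zero, List.foldl_map, List.map_map]
  have hfold :
      (fun (zo : List Int × List Int) (line : String) =>
        (List.range (PySem.Str.len ((PySem.List.pyGet? l 0).getD "")).toNat).foldl
          (fun (zo : List Int × List Int) (j : Nat) =>
            if pvIntAt line (j : Int) = 0 then
              (PySem.List.pySetD zo.1 (j : Int) (PySem.List.pyGetD zo.1 (j : Int) 0 + 1), zo.2)
            else (zo.1, PySem.List.pySetD zo.2 (j : Int) (PySem.List.pyGetD zo.2 (j : Int) 0 + 1))) zo)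
      = (fun (zo : List Int × List Int) (line : String) =>
        (List.range (PySem.Str.len ((PySem.List.pyGet? l 0).getD "")).toNat).foldl
          (fun (zo : List Int × List Int) (j : Nat) =>
            if pvIntAt line (j : Int) = 0 then
              (zo.1.set j (zo.1.getD j 0 + 1), zo.2)
            else (zo.1, zo.2.set j (zo.2.getD j 0 + 1))) zo) := by
    funext zo line
    congr 1
    funext zo j
    simp [PySem.List.pySetD_natCast, PySem.List.pyGetD_natCast]
  rw [hfold]
  set m := (PySem.Str.len ((PySem.List.pyGet? l 0).getD "")).toNat with hm
  rw [pv_outer_eq m l (List.replicate m 0) (List.replicate m 0),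
    pv_mapIdx_replicate, pv_mapIdx_replicate]
  refine Prod.ext ?_ ?_
  · simp only
    apply List.map_congr_left
    intro j hj
    have hjm : j < m := List.mem_range.mp hj
    simp only [Function.comp, if_pos hjm, zero_add, pv_sum_eq_cnt,
      pv_cnt_partition]
  · simp only
    apply List.map_congr_left
    intro j hj
    have hjm : j < m := List.mem_range.mp hj
    simp only [Function.comp, if_pos hjm, zero_add, pv_sum_eq_cnt]
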